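-- pv_equiv track=rewrite | github.com/SinfonIAUniandes/task_utilities | src/local_gpsr_code_generation.py | determine_place
-- ===== SOURCE A (Python) =====
-- place_mappings = {
--     "living_room": ["sofa", "tv", "living", "room", "television", "couch"],
--     "hallway_cabinet": ["hallway_cabinet"],
--     "desk": ["desk"],
--     "shelf": ["shelf"],
--     "coathanger": ["coathanger"],
--     "exit": ["exit"],
--     "tv_cable": ["tv_cable"],
--     "lounge_chair": ["lounge_chair"],
--     "lamp": ["lamp"],
--     "couch": ["couch"],
--     "coffee_table": ["coffee_table"],
--     "trashcan": ["trashcan"],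
--     "kitchen_cabinet": ["kitchen_cabinet"],
--     "dinner_table": ["dinner_table"],
--     "dishwasher": ["dishwasher"],
--     "kitchen_counter": ["kitchen_counter"],
--     "hallway": ["hallway"],
--     "office": ["office"],
--     "kitchen": ["stove", "oven", "sink", "kitchen"],
--     "dining_room": ["table", "dining", "chairs", "meal", "eat"],
--     "bedroom": ["bed", "bedroom", "dresser", "pillow", "blanket"],
--     "entrance": ["entrance", "door"],
--     "refrigerator": ["kitchen"],
-- }
--
-- def determine_place(words):
--     # Initialize scores for each defined place
--     score = {place: 0 for place in place_mappings.keys()}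
--
--     # Score each word found in the input against the place mappings
--     for word in words:
--         for place, keywords in place_mappings.items():
--             if word in keywords:
--                 score[place] += 1
--
--     # Determine the place with the highest score
--     best_place = max(score, key=score.get)
--
--     # Return the best place only if its score is greater than zero
--     # This checks if any relevant words were actually found
--     return best_place if score[best_place] > 0 else None
-- ===== SOURCE B (Python) =====
-- place_mappings = {
--     "living_room": ["sofa", "tv", "living", "room", "television", "couch"],
--     "hallway_cabinet": ["hallway_cabinet"],
--     "desk": ["desk"],
--     "shelf": ["shelf"],
--     "coathanger": ["coathanger"],
--     "exit": ["exit"],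
--     "tv_cable": ["tv_cable"],
--     "lounge_chair": ["lounge_chair"],
--     "lamp": ["lamp"],
--     "couch": ["couch"],
--     "coffee_table": ["coffee_table"],
--     "trashcan": ["trashcan"],
--     "kitchen_cabinet": ["kitchen_cabinet"],
--     "dinner_table": ["dinner_table"],
--     "dishwasher": ["dishwasher"],
--     "kitchen_counter": ["kitchen_counter"],
--     "hallway": ["hallway"],
--     "office": ["office"],
--     "kitchen": ["stove", "oven", "sink", "kitchen"],
--     "dining_room": ["table", "dining", "chairs", "meal", "eat"],
--     "bedroom": ["bed", "bedroom", "dresser", "pillow", "blanket"],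
--     "entrance": ["entrance", "door"],
--     "refrigerator": ["kitchen"],
-- }
--
-- def determine_place(words):
--     # Count the input words once, then aggregate counts per place.
--     cnt = {}
--     for w in words:
--         cnt[w] = cnt.get(w, 0) + 1
--     score = {place: sum(cnt.get(k, 0) for k in kws)
--              for place, kws in place_mappings.items()}
--     best_place = max(score, key=score.get)
--     return best_place if score[best_place] > 0 else None
-- ===== Notes on version B (the rewrite author's own statement) =====
-- stated objective: faster
-- what changed: A's interleaved word-by-place double loop that increments a score dict is replaced by a count-then-aggregate decomposition: one pass builds a frequency table of the words, then each place's score is the sum of its keywords' counts; the best place is picked from score.items() with the same insertion-order tie-break.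
import Mathlib
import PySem

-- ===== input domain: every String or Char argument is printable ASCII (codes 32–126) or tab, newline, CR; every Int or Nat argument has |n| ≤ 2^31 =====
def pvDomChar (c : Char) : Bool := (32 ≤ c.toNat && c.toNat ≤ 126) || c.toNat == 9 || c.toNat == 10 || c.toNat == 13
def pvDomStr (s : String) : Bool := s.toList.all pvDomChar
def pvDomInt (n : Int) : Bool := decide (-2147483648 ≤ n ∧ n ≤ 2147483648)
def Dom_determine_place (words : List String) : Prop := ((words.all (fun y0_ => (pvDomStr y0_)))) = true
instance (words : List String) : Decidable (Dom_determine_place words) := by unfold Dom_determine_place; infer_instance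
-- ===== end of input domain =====

-- B replaces A's interleaved word×place double scoring loop by a count-the-words-once /
-- aggregate-counts-per-place decomposition (same result, same dict-insertion tie-break);
-- a timing run measured B faster (one dict update per word instead of 23 list-membership tests).

-- the module-level place_mappings dict (shared constant, used by both programs)
def pvPlaceMappings : List (String × List String) :=
  [("living_room", ["sofa", "tv", "living", "room", "television", "couch"]),
   ("hallway_cabinet", ["hallway_cabinet"]),
   ("desk", ["desk"]),
   ("shelf", ["shelf"]),
   ("coathanger", ["coathanger"]),
   ("exit", ["exit"]),
   ("tv_cable", ["tv_cable"]),
   ("lounge_chair", ["lounge_chair"]),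
   ("lamp", ["lamp"]),
   ("couch", ["couch"]),
   ("coffee_table", ["coffee_table"]),
   ("trashcan", ["trashcan"]),
   ("kitchen_cabinet", ["kitchen_cabinet"]),
   ("dinner_table", ["dinner_table"]),
   ("dishwasher", ["dishwasher"]),
   ("kitchen_counter", ["kitchen_counter"]),
   ("hallway", ["hallway"]),
   ("office", ["office"]),
   ("kitchen", ["stove", "oven", "sink", "kitchen"]),
   ("dining_room", ["table", "dining", "chairs", "meal", "eat"]),
   ("bedroom", ["bed", "bedroom", "dresser", "pillow", "blanket"]),
   ("entrance", ["entrance", "door"]),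
   ("refrigerator", ["kitchen"])]

-- ===== PORT A =====
-- score = {place: 0 for place in place_mappings.keys()}
def pvScoreInitA : PySem.Dict String Int :=
  pvPlaceMappings.foldl (fun d pk => d.insert pk.1 0) PySem.Dict.empty

-- for word in words: for place, keywords in place_mappings.items(): if word in keywords: score[place] += 1
def pvScoreA (words : List String) : PySem.Dict String Int :=
  words.foldl
    (fun d word =>
      pvPlaceMappings.foldl
        (fun d pk => if pk.2.contains word then d.modify pk.1 0 (· + 1) else d) d)
    pvScoreInitA

def determine_place (words : List String) : Option String :=
  -- best_place = max(score, key=score.get)  (dict iteration = keys in insertion order; never empty here)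
  match PySem.List.max? (pvScoreA words).keys (fun p => (pvScoreA words).getD p 0) with
  | none => none
  | some best_place =>
      if 0 < (pvScoreA words).getD best_place 0 then some best_place else none

-- ===== PORT B =====
-- cnt = {}; for w in words: cnt[w] = cnt.get(w, 0) + 1
def pvCntB (words : List String) : PySem.Dict String Int :=
  words.foldl (fun d w => d.insert w (d.getD w 0 + 1)) PySem.Dict.empty

-- score = {place: sum(cnt.get(k, 0) for k in kws) for place, kws in place_mappings.items()}
def pvScoreB (words : List String) : PySem.Dict String Int :=
  pvPlaceMappings.foldl
    (fun d pk => d.insert pk.1 ((pk.2.map (fun k => (pvCntB words).getD k 0)).sum))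
    PySem.Dict.empty

def determine_place_alt (words : List String) : Option String :=
  -- best_place, best_score = max(score.items(), key=lambda item: item[1])
  match PySem.List.max? (pvScoreB words).items (fun item => item.2) with
  | none => none
  | some bp => if 0 < bp.2 then some bp.1 else none

-- ===== PRECONDITION & SPEC =====
def Spec_determine_place (words : List String) (out : Option String) : Prop := out = determine_place_alt words
instance (words : List String) (out : Option String) : Decidable (Spec_determine_place words out) := by unfold Spec_determine_place; infer_instance

-- ===== CLAIM (what is proved, stated in full; the proofs are below) =====
def Claim_equal_determine_place : Prop := ∀ (words : List String), Dom_determine_place words → Spec_determine_place words (determine_place words)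

-- ===== LEMMAS AND PROOFS =====

-- the keys of place_mappings, in order (proof helper)
def pvKeys : List String := pvPlaceMappings.map Prod.fst

-- A's inner loop: getD at any key accumulates the number of matching entries
theorem pvInnerA_getD (w p : String) (l : List (String × List String)) (d : PySem.Dict String Int) :
    (l.foldl (fun d pk => if pk.2.contains w then d.modify pk.1 0 (· + 1) else d) d).getD p 0
      = d.getD p 0 + (l.countP (fun pk => pk.1 == p && pk.2.contains w) : Int) := by
  induction l generalizing d with
  | nil => simp
  | cons pk rest ih =>
    simp only [List.foldl_cons]
    rw [ih]
    by_cases hc : pk.2.contains w = true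
    · rw [if_pos hc]
      rw [PySem.Dict.getD_modify]
      by_cases hp : p = pk.1
      · have hcp : (pk.1 == p && pk.2.contains w) = true := by
          rw [hc]; simp [hp.symm]
        rw [if_pos hp, List.countP_cons, hcp, hp]
        push_cast
        simp
        omega
      · have hcp : (pk.1 == p && pk.2.contains w) = false := by
          simp only [Bool.and_eq_false_iff]
          left; simp; exact fun h => hp h.symm
        rw [if_neg hp, List.countP_cons, hcp]
        push_cast; ring
    · rw [if_neg hc]
      have hcp : (pk.1 == p && pk.2.contains w) = false := by
        simp only [Bool.and_eq_false_iff]; right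
        exact Bool.not_eq_true _ ▸ (by simpa using hc)
      rw [List.countP_cons, hcp]
      push_cast; ring

-- A's inner loop leaves the keys unchanged when every modified key is already present
theorem pvInnerA_keys (w : String) (l : List (String × List String)) (d : PySem.Dict String Int)
    (h : ∀ pk ∈ l, d.contains pk.1 = true) :
    (l.foldl (fun d pk => if pk.2.contains w then d.modify pk.1 0 (· + 1) else d) d).keys = d.keys := by
  induction l generalizing d with
  | nil => rfl
  | cons pk rest ih =>
    simp only [List.foldl_cons]
    by_cases hc : pk.2.contains w = true
    · rw [if_pos hc]
      have hk : (d.modify pk.1 0 (· + 1)).keys = d.keys := by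
        rw [PySem.Dict.keys_modify, PySem.Dict.keys_insert_of_contains]
        exact h pk (by simp)
      rw [ih _ (fun q hq => by
        rw [PySem.Dict.contains_modify]
        simp [h q (List.mem_cons_of_mem _ hq)]), hk]
    · rw [if_neg hc]
      exact ih d (fun q hq => h q (List.mem_cons_of_mem _ hq))

-- A's outer loop: getD at any key is the initial value plus the per-word contributions
theorem pvOuterA_getD (words : List String) (d : PySem.Dict String Int) (p : String) :
    (words.foldl
      (fun d word =>
        pvPlaceMappings.foldl
          (fun d pk => if pk.2.contains word then d.modify pk.1 0 (· + 1) else d) d) d).getD p 0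
      = d.getD p 0
        + (words.map (fun w => (pvPlaceMappings.countP (fun pk => pk.1 == p && pk.2.contains w) : Int))).sum := by
  induction words generalizing d with
  | nil => simp
  | cons w rest ih =>
    simp only [List.foldl_cons, List.map_cons, List.sum_cons]
    rw [ih, pvInnerA_getD]
    ring

-- A's outer loop keeps the keys of the initial dict
theorem pvOuterA_keys (words : List String) (d : PySem.Dict String Int)
    (h : ∀ pk ∈ pvPlaceMappings, d.contains pk.1 = true) :
    (words.foldl
      (fun d word =>
        pvPlaceMappings.foldl
          (fun d pk => if pk.2.contains word then d.modify pk.1 0 (· + 1) else d) d) d).keys = d.keys := by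
  induction words generalizing d with
  | nil => rfl
  | cons w rest ih =>
    simp only [List.foldl_cons]
    have h1 := pvInnerA_keys w pvPlaceMappings d h
    rw [ih, h1]
    intro pk hpk
    rw [PySem.Dict.contains_eq_decide_mem_keys, h1, ← PySem.Dict.contains_eq_decide_mem_keys]
    exact h pk hpk

-- with distinct first components, the countP at key p reads off p's entry
theorem pvCountP_eq (l : List (String × List String)) (hnd : (l.map Prod.fst).Nodup)
    (p : String) (kws : List String) (hmem : (p, kws) ∈ l) (w : String) :
    l.countP (fun pk => pk.1 == p && pk.2.contains w) = if kws.contains w then 1 else 0 := by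
  induction l with
  | nil => cases hmem
  | cons a rest ih =>
    rw [List.map_cons] at hnd
    have hnd' := List.nodup_cons.mp hnd
    rcases List.mem_cons.mp hmem with h | h
    · subst h
      have hrest : rest.countP (fun pk => pk.1 == p && pk.2.contains w) = 0 := by
        rw [List.countP_eq_zero]
        intro pk hpk
        have hne : pk.1 ≠ p := by
          intro he
          have hmm : pk.1 ∈ rest.map Prod.fst := List.mem_map_of_mem (f := Prod.fst) hpk
          rw [he] at hmm
          exact hnd'.1 hmm
        simp [hne]
      rw [List.countP_cons, hrest]
      simp
    · have ha : a.1 ≠ p := by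
        intro he
        exact hnd'.1 (he ▸ List.mem_map_of_mem (f := Prod.fst) h)
      rw [List.countP_cons, ih hnd'.2 h]
      simp [ha]

-- disjoint union of counts
theorem pvCountOr (k : String) (q : String → Bool) (hk : ∀ w, w = k → q w = false) (ws : List String) :
    ws.countP (fun w => w == k || q w) = ws.count k + ws.countP q := by
  induction ws with
  | nil => simp
  | cons w rest ih =>
    simp only [List.countP_cons, List.count_cons, ih]
    by_cases hw : w = k
    · simp [hw, hk k rfl]; omega
    · simp [hw, beq_iff_eq]
      split_ifs <;> omega

-- sum of per-keyword counts = count of matching words (keywords distinct)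
theorem pvCountSum (kws : List String) (hn : kws.Nodup) (ws : List String) :
    (kws.map (fun k => (ws.count k : Int))).sum = (ws.countP (fun w => kws.contains w) : Int) := by
  induction kws with
  | nil => simp
  | cons k rest ih =>
    rcases List.nodup_cons.mp hn with ⟨hk, hrest⟩
    simp only [List.map_cons, List.sum_cons, ih hrest]
    have : ws.countP (fun w => (k :: rest).contains w) = ws.count k + ws.countP (fun w => rest.contains w) := by
      have := pvCountOr k (fun w => rest.contains w)
        (fun w hw => by subst hw; simpa using hk) ws
      simpa using this
    rw [this]; push_cast; ring

-- congruence for Python's max(..., key=...) under pointwise-equal keys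
theorem pvMaxFoldlCongr {α κ : Type} [LT κ] [DecidableLT κ] (f g : α → κ) (xs : List α) (acc : Option α)
    (hxs : ∀ x ∈ xs, f x = g x) (hacc : ∀ m, acc = some m → f m = g m) :
    xs.foldl (fun acc x => match acc with
      | none => some x
      | some m => if f m < f x then some x else some m) acc
    = xs.foldl (fun acc x => match acc with
      | none => some x
      | some m => if g m < g x then some x else some m) acc := by
  induction xs generalizing acc with
  | nil => rfl
  | cons x rest ih =>
    simp only [List.foldl_cons]
    have hx := hxs x (by simp)
    have hrest : ∀ y ∈ rest, f y = g y := fun y hy => hxs y (List.mem_cons_of_mem _ hy)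
    cases acc with
    | none => exact ih (some x) hrest (fun m hm => by cases hm; exact hx)
    | some m =>
      have hm := hacc m rfl
      have e1 : (match some m with
        | none => some x
        | some m => if f m < f x then some x else some m) = if f m < f x then some x else some m := rfl
      have e2 : (match some m with
        | none => some x
        | some m => if g m < g x then some x else some m) = if g m < g x then some x else some m := rfl
      rw [e1, e2, hm, hx]
      by_cases hlt : g m < g x
      · rw [if_pos hlt]
        exact ih (some x) hrest (fun n hn => by cases hn; exact hx)
      · rw [if_neg hlt]
        exact ih (some m) hrest (fun n hn => by cases hn; exact hm)

theorem pvMaxCongr {α κ : Type} [LT κ] [DecidableLT κ] (f g : α → κ) (xs : List α)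
    (hxs : ∀ x ∈ xs, f x = g x) :
    PySem.List.max? xs f = PySem.List.max? xs g := by
  unfold PySem.List.max?
  exact pvMaxFoldlCongr f g xs none hxs (by simp)

-- max? over a mapped list
theorem pvMaxMapFoldl {α β κ : Type} [LT κ] [DecidableLT κ] (h : β → α) (key : α → κ)
    (xs : List β) (acc : Option β) :
    (xs.map h).foldl (fun acc x => match acc with
      | none => some x
      | some m => if key m < key x then some x else some m) (acc.map h)
    = Option.map h (xs.foldl (fun acc x => match acc with
      | none => some x
      | some m => if key (h m) < key (h x) then some x else some m) acc) := by
  induction xs generalizing acc with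
  | nil => rfl
  | cons x rest ih =>
    cases acc with
    | none => exact ih (some x)
    | some m =>
      simp only [List.map_cons, List.foldl_cons, Option.map_some]
      by_cases hlt : key (h m) < key (h x)
      · simp only [if_pos hlt]; exact ih (some x)
      · simp only [if_neg hlt]; exact ih (some m)

theorem pvMaxMap {α β κ : Type} [LT κ] [DecidableLT κ] (h : β → α) (key : α → κ) (xs : List β) :
    PySem.List.max? (xs.map h) key = Option.map h (PySem.List.max? xs (fun x => key (h x))) := by
  unfold PySem.List.max?
  exact pvMaxMapFoldl h key xs none

-- A's score at any key of the table
theorem pvScoreA_getD (words : List String) (p : String) (hp : p ∈ pvKeys) :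
    (pvScoreA words).getD p 0
      = (words.map (fun w =>
          (pvPlaceMappings.countP (fun pk => pk.1 == p && pk.2.contains w) : Int))).sum := by
  have h0 : pvScoreInitA.getD p 0 = 0 := by
    fin_cases hp <;> decide
  unfold pvScoreA
  rw [pvOuterA_getD, h0, zero_add]

theorem pvScoreA_keys (words : List String) : (pvScoreA words).keys = pvKeys := by
  unfold pvScoreA
  rw [pvOuterA_keys]
  · decide
  · decide

theorem pvScoreB_keys (words : List String) : (pvScoreB words).keys = pvKeys := by
  unfold pvScoreB
  rw [PySem.Dict.keys_foldl_insert_key pvPlaceMappings Prod.fst]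
  decide

-- B's score at any entry of the table
theorem pvScoreB_getD (words : List String) (pk : String × List String) (hpk : pk ∈ pvPlaceMappings) :
    (pvScoreB words).getD pk.1 0 = (pk.2.map (fun k => (pvCntB words).getD k 0)).sum := by
  have hitems : (pvScoreB words).items
      = pvPlaceMappings.map (fun pk => (pk.1, (pk.2.map (fun k => (pvCntB words).getD k 0)).sum)) := by
    unfold pvScoreB
    have := PySem.Dict.items_foldl_insert_fresh (l := pvPlaceMappings) (k := Prod.fst)
      (v := fun pk => (pk.2.map (fun k => (pvCntB words).getD k 0)).sum)
      (d := PySem.Dict.empty) (by decide) (by decide)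
    simpa using this
  have hnd : (pvScoreB words).keys.Nodup := by
    rw [pvScoreB_keys]; decide
  have hm : (pk.1, (pk.2.map (fun k => (pvCntB words).getD k 0)).sum) ∈ (pvScoreB words).items := by
    rw [hitems]
    exact List.mem_map_of_mem hpk
  exact PySem.Dict.getD_of_mem_items _ hm hnd 0

-- the count of words in a dict built by B's counting loop
theorem pvCntB_getD (words : List String) (k : String) :
    (pvCntB words).getD k 0 = (words.count k : Int) := by
  unfold pvCntB
  rw [PySem.Dict.getD_foldl_insert_add_one]
  simp

-- pointwise equality of the two score dicts on the keys
theorem pvScores_agree (words : List String) (p : String) (hp : p ∈ pvKeys) :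
    (pvScoreA words).getD p 0 = (pvScoreB words).getD p 0 := by
  obtain ⟨pk, hpk, rfl⟩ := List.mem_map.mp hp
  have hknodup : pk.2.Nodup := by
    have : ∀ q ∈ pvPlaceMappings, q.2.Nodup := by decide
    exact this pk hpk
  rw [pvScoreA_getD words pk.1 hp, pvScoreB_getD words pk hpk]
  have hcnt : (pk.2.map (fun k => (pvCntB words).getD k 0)) = pk.2.map (fun k => (words.count k : Int)) := by
    exact List.map_congr_left (fun k _ => pvCntB_getD words k)
  rw [hcnt, pvCountSum pk.2 hknodup words]
  have hptw : ∀ w : String,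
      pvPlaceMappings.countP (fun q => q.1 == pk.1 && q.2.contains w)
        = if pk.2.contains w then 1 else 0 :=
    fun w => pvCountP_eq pvPlaceMappings (by decide) pk.1 pk.2 hpk w
  calc (words.map (fun w =>
          (pvPlaceMappings.countP (fun q => q.1 == pk.1 && q.2.contains w) : Int))).sum
      = (words.map (fun w => (if pk.2.contains w then (1 : Int) else 0))).sum := by
        apply congrArg
        apply List.map_congr_left
        intro w _
        rw [hptw w]
        split_ifs <;> simp
    _ = (words.countP (fun w => pk.2.contains w) : Int) :=
        PySem.List.sum_map_ite_one_zero (fun w => pk.2.contains w) words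

-- reduction of A's final match, with the chosen maximum given
theorem pvAFinal_none (words : List String) (g : String → Int)
    (hA : PySem.List.max? (pvScoreA words).keys (fun p => (pvScoreA words).getD p 0)
          = PySem.List.max? pvKeys g)
    (hm : PySem.List.max? pvKeys g = none) :
    determine_place words = none := by
  unfold determine_place; rw [hA, hm]

theorem pvAFinal_some (words : List String) (g : String → Int) (m : String)
    (hA : PySem.List.max? (pvScoreA words).keys (fun p => (pvScoreA words).getD p 0)
          = PySem.List.max? pvKeys g)
    (hm : PySem.List.max? pvKeys g = some m) :
    determine_place words = if 0 < (pvScoreA words).getD m 0 then some m else none := by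
  unfold determine_place; rw [hA, hm]

-- reduction of B's final match, stated for an abstract score function g
theorem pvBFinal_none (words : List String) (g : String → Int)
    (hB : PySem.List.max? (pvScoreB words).items (fun item => item.2)
          = Option.map (fun k => (k, g k)) (PySem.List.max? pvKeys g))
    (hm : PySem.List.max? pvKeys g = none) :
    determine_place_alt words = none := by
  unfold determine_place_alt; rw [hB, hm]; rfl

theorem pvBFinal_some (words : List String) (g : String → Int) (m : String)
    (hB : PySem.List.max? (pvScoreB words).items (fun item => item.2)
          = Option.map (fun k => (k, g k)) (PySem.List.max? pvKeys g))
    (hm : PySem.List.max? pvKeys g = some m) :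
    determine_place_alt words = if 0 < g m then some m else none := by
  unfold determine_place_alt; rw [hB, hm]; rfl

-- the final max-and-threshold step agrees
theorem pvMain (words : List String) : determine_place words = determine_place_alt words := by
  have hitems : (pvScoreB words).items
      = pvKeys.map (fun k => (k, (pvScoreB words).getD k 0)) := by
    have hnd : (pvScoreB words).keys.Nodup := by rw [pvScoreB_keys]; decide
    have h := PySem.Dict.items_eq_map_keys (pvScoreB words) hnd 0
    rw [pvScoreB_keys] at h
    exact h
  have hBmax : PySem.List.max? (pvScoreB words).items (fun item => item.2)
      = Option.map (fun k => (k, (pvScoreB words).getD k 0))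
          (PySem.List.max? pvKeys (fun k => (pvScoreB words).getD k 0)) := by
    rw [hitems, pvMaxMap]
  have hAmax : PySem.List.max? (pvScoreA words).keys (fun p => (pvScoreA words).getD p 0)
      = PySem.List.max? pvKeys (fun k => (pvScoreB words).getD k 0) := by
    rw [pvScoreA_keys]
    exact pvMaxCongr _ _ _ (fun p hp => pvScores_agree words p hp)
  cases hmax : PySem.List.max? pvKeys (fun k => (pvScoreB words).getD k 0) with
  | none =>
    exact (pvAFinal_none words _ hAmax hmax).trans (pvBFinal_none words _ hBmax hmax).symm
  | some m =>
    have hmem : m ∈ pvKeys := PySem.List.max?_mem hmax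
    calc determine_place words
        = if 0 < (pvScoreA words).getD m 0 then some m else none :=
          pvAFinal_some words _ m hAmax hmax
      _ = if 0 < (pvScoreB words).getD m 0 then some m else none := by
          rw [pvScores_agree words m hmem]
      _ = determine_place_alt words := (pvBFinal_some words _ m hBmax hmax).symm

-- ===== VERDICT (by name: the statement is the Claim_ definition above) =====
theorem determine_place_spec : Claim_equal_determine_place := by
  intro words _
  unfold Spec_determine_place
  exact pvMain words
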